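-- pv_equiv track=rewrite | github.com/SandorSzabolcs/einjax | execution/sparse_dispatch.py | _partition_matched_pairs
-- ===== SOURCE A (Python) =====
-- def _partition_matched_pairs(
--     num_matches: int,
--     num_devices: int,
-- ) -> list[tuple[int, int]]:
--     """Partition matched tile pairs across devices for parallel execution.
--
--     Distributes matched pairs as evenly as possible using contiguous slices.
--     Each device gets a (start, end) range into the matched-pair arrays.
--
--     Args:
--         num_matches: Total number of matched tile pairs.
--         num_devices: Number of devices to partition across.
--
--     Returns:
--         List of (start, end) index tuples, one per device.
--     """
--     if num_matches == 0:
--         return [(0, 0)] * num_devices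
--
--     base_size = num_matches // num_devices
--     remainder = num_matches % num_devices
--     partitions = []
--     offset = 0
--     for d in range(num_devices):
--         size = base_size + (1 if d < remainder else 0)
--         partitions.append((offset, offset + size))
--         offset += size
--     return partitions
-- ===== SOURCE B (Python) =====
-- def _partition_matched_pairs(num_matches, num_devices):
--     if num_matches == 0:
--         return [(0, 0)] * num_devices
--     base, rem = divmod(num_matches, num_devices)
--     bounds = [d * base + min(d, rem) for d in range(num_devices + 1)]
--     return list(zip(bounds, bounds[1:]))
-- ===== Notes on version B (the rewrite author's own statement) =====
-- stated objective: simpler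
-- what changed: Replaces the running-offset accumulator loop with a per-boundary closed form d*base + min(d, rem) computed independently for each cut point, zipping consecutive bounds into slices.
import Mathlib
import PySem

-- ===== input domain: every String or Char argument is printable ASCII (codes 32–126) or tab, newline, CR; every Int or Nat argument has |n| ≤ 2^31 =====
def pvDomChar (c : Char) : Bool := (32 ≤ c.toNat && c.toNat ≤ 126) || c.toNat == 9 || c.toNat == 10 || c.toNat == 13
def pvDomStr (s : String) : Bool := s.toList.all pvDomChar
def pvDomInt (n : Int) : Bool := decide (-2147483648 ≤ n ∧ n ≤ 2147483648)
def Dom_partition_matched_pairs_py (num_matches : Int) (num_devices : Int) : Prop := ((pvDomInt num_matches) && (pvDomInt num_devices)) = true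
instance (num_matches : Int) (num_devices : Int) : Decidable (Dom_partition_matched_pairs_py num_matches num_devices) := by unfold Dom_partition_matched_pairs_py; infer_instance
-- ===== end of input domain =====

-- B replaces A's running-offset accumulator loop with an independent closed-form
-- cut point per boundary (d*base + min(d, rem)) zipped into consecutive slices: simpler.

-- ===== PORT A =====
def partition_matched_pairs_py (num_matches : Int) (num_devices : Int) : List (Int × Int) :=
  if num_matches = 0 then List.replicate num_devices.toNat (0, 0)
  else
    let base_size := PySem.Int.floordiv num_matches num_devices
    let remainder := PySem.Int.mod num_matches num_devices
    let st := (PySem.List.pyRange 0 num_devices 1).foldl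
      (fun (st : List (Int × Int) × Int) d =>
        let size := base_size + (if d < remainder then (1 : Int) else 0)
        (st.1 ++ [(st.2, st.2 + size)], st.2 + size)) ([], 0)
    st.1

-- ===== PORT B =====
def partition_matched_pairs_py_alt (num_matches : Int) (num_devices : Int) : List (Int × Int) :=
  if num_matches = 0 then List.replicate num_devices.toNat (0, 0)
  else
    let base := PySem.Int.floordiv num_matches num_devices
    let rem := PySem.Int.mod num_matches num_devices
    let bounds := (PySem.List.pyRange 0 (num_devices + 1) 1).map (fun d => d * base + min d rem)
    bounds.zip bounds.tail

-- ===== PRECONDITION & SPEC =====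
-- Pre_ excludes exactly the inputs where A raises ZeroDivisionError (num_matches ≠ 0 and num_devices = 0).
def Pre_partition_matched_pairs_py (num_matches : Int) (num_devices : Int) : Prop :=
  num_matches = 0 ∨ num_devices ≠ 0
instance (num_matches : Int) (num_devices : Int) : Decidable (Pre_partition_matched_pairs_py num_matches num_devices) := by unfold Pre_partition_matched_pairs_py; infer_instance
def pvWitness_partition_matched_pairs_py : Int × Int := (7, 3)

def Spec_partition_matched_pairs_py (num_matches : Int) (num_devices : Int) (out : List (Int × Int)) : Prop := out = partition_matched_pairs_py_alt num_matches num_devices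
instance (num_matches : Int) (num_devices : Int) (out : List (Int × Int)) : Decidable (Spec_partition_matched_pairs_py num_matches num_devices out) := by unfold Spec_partition_matched_pairs_py; infer_instance

-- ===== CLAIM (what is proved, stated in full; the proofs are below) =====
def Claim_equal_partition_matched_pairs_py : Prop := ∀ (num_matches : Int) (num_devices : Int), Dom_partition_matched_pairs_py num_matches num_devices → Pre_partition_matched_pairs_py num_matches num_devices → Spec_partition_matched_pairs_py num_matches num_devices (partition_matched_pairs_py num_matches num_devices)

-- ===== LEMMAS AND PROOFS =====

-- B's zip of consecutive bounds, written as a map over consecutive indices.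
theorem zip_tail_map_range {α : Type} (g : Nat → α) (k : Nat) :
    ((List.range (k+1)).map g).zip (((List.range (k+1)).map g).tail)
      = (List.range k).map (fun d => (g d, g (d+1))) := by
  apply List.ext_getElem
  · simp [List.length_tail]
  · intro i h1 h2
    simp only [List.length_map, List.length_range] at h2
    simp [List.getElem_zip, List.getElem_tail, List.getElem_map, List.getElem_range]

-- A's fold, characterised: after folding d = 0..k-1, the partitions are the
-- consecutive pairs of the cut function f d = d*base + min d rem, and offset = f k.
theorem foldA_char (base rem : Int) (hrem : 0 ≤ rem) :
    ∀ (k : Nat),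
      (((List.range k).map (fun d : Nat => (d : Int))).foldl
        (fun (st : List (Int × Int) × Int) d =>
          let size := base + (if d < rem then (1 : Int) else 0)
          (st.1 ++ [(st.2, st.2 + size)], st.2 + size)) ([], 0))
      = ((List.range k).map (fun d : Nat => ((d : Int) * base + min (d : Int) rem,
            ((d : Int) + 1) * base + min ((d : Int) + 1) rem)),
         (k : Int) * base + min (k : Int) rem) := by
  intro k
  induction k with
  | zero => simp; omega
  | succ j ih =>
      rw [List.range_succ]
      simp only [List.map_append, List.map_cons, List.map_nil, List.foldl_append,
        List.foldl_cons, List.foldl_nil, ih]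
      have hmul : ((j : Int) + 1) * base = (j : Int) * base + base := by ring
      refine Prod.ext ?_ ?_
      · simp only [List.append_cancel_left_eq, List.cons.injEq, and_true]
        refine Prod.ext rfl ?_
        push_cast; rw [hmul]; split_ifs with h <;> omega
      · push_cast; rw [hmul]; split_ifs with h <;> omega

theorem partition_eq (num_matches num_devices : Int) (h : num_devices ≠ 0) :
    partition_matched_pairs_py num_matches num_devices
      = partition_matched_pairs_py_alt num_matches num_devices := by
  unfold partition_matched_pairs_py partition_matched_pairs_py_alt
  by_cases hm : num_matches = 0
  · simp [hm]
  · simp only [hm, if_false]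
    set base := PySem.Int.floordiv num_matches num_devices with hb
    set rem := PySem.Int.mod num_matches num_devices with hr
    rcases (by omega : num_devices ≤ 0 ∨ 0 < num_devices) with hn | hn
    · rw [PySem.List.pyRange_one_eq_nil hn]
      rcases (by omega : num_devices < 0 ∨ num_devices = 0) with hlt | heq
      · rw [PySem.List.pyRange_one_eq_nil (by omega : num_devices + 1 ≤ 0)]; simp
      · exact absurd heq h
    · obtain ⟨n, hn'⟩ : ∃ n : Nat, num_devices = (n : Int) := ⟨num_devices.toNat, by omega⟩
      have hrem : 0 ≤ rem := PySem.Int.mod_nonneg _ hn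
      rw [hn', PySem.List.pyRange_one, PySem.List.pyRange_one]
      simp only [sub_zero, zero_add]
      rw [show ((n : Int)).toNat = n by omega, show ((n : Int) + 1).toNat = n + 1 by omega]
      rw [foldA_char base rem hrem n]
      rw [show ((List.range (n+1)).map (fun k : Nat => (k : Int))).map
            (fun d : Int => d * base + min d rem)
          = (List.range (n+1)).map (fun k : Nat => (k : Int) * base + min (k : Int) rem)
          from by rw [List.map_map]; rfl]
      rw [zip_tail_map_range (fun d : Nat => (d : Int) * base + min (d : Int) rem) n]
      apply List.map_congr_left
      intro d _
      push_cast
      rfl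

-- ===== VERDICT (by name: the statement is the Claim_ definition above) =====
theorem partition_matched_pairs_py_spec : Claim_equal_partition_matched_pairs_py := by
  intro m n _ hpre
  unfold Spec_partition_matched_pairs_py
  by_cases hn : n = 0
  · rcases hpre with hm | hn'
    · subst hm; subst hn; rfl
    · exact absurd hn hn'
  · exact partition_eq m n hn
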